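-- pv_equiv track=rewrite | github.com/renga-agents/renga | scripts/fix_markdown_lint.py | fix_md009
-- ===== SOURCE A (Python) =====
-- def _in_frontmatter(lines: list[str], idx: int) -> bool:
--     """Return True if line at idx is inside YAML frontmatter (between --- delimiters).
--
--     Frontmatter only exists when the very first line of the file is ---.
--     """
--     if not lines or lines[0].rstrip() != "---":
--         return False
--     fence_count = 0
--     for i in range(idx):
--         if lines[i].rstrip() == "---":
--             fence_count += 1
--     return fence_count == 1  # between first and second ---
--
-- def fix_md009(lines: list[str]) -> tuple[list[str], int]:
--     """Remove trailing whitespace from lines (excluding blank lines and frontmatter)."""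
--     count = 0
--     for i, line in enumerate(lines):
--         if _in_frontmatter(lines, i):
--             continue
--         # Strip trailing whitespace while preserving the newline
--         if line.endswith("\n"):
--             stripped = line.rstrip() + "\n"
--         else:
--             stripped = line.rstrip()
--         if stripped != line:
--             lines[i] = stripped
--             count += 1
--     return lines, count
-- ===== SOURCE B (Python) =====
-- def fix_md009(lines: list[str]) -> tuple[list[str], int]:
--     """Remove trailing whitespace from lines (excluding blank lines and frontmatter).
--
--     Single pass: tracks the frontmatter fence count incrementally instead of
--     rescanning the whole prefix for every line.  Mutates `lines` in place like
--     the original.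
--     """
--     count = 0
--     has_fm = bool(lines) and lines[0].rstrip() == "---"
--     fences = 0
--     out = []
--     for line in lines:
--         in_fm = has_fm and fences == 1
--         if line.rstrip() == "---":
--             fences += 1
--         if in_fm:
--             out.append(line)
--             continue
--         stripped = line.rstrip() + "\n" if line.endswith("\n") else line.rstrip()
--         if stripped != line:
--             count += 1
--         out.append(stripped)
--     lines[:] = out
--     return lines, count
-- ===== Notes on version B (the rewrite author's own statement) =====
-- stated objective: alternative
-- what changed: A calls _in_frontmatter for every line, rescanning the whole prefix to count '---' fences (quadratic when the file starts with a frontmatter fence); B makes one pass over the lines, carrying the fence count and frontmatter flag as running state.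
import Mathlib
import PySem

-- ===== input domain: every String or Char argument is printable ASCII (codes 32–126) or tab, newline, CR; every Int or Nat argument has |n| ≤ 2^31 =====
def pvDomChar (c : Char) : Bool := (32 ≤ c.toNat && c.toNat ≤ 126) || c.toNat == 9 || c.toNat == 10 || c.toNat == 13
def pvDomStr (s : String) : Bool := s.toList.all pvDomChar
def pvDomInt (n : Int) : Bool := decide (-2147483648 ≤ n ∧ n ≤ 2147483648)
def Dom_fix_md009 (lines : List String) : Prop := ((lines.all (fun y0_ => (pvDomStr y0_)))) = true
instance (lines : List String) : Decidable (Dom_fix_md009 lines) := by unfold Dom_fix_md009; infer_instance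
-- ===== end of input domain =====

-- B replaces A's per-line rescan of the whole prefix (_in_frontmatter) by a single pass that
-- tracks the frontmatter fence count incrementally (objective: alternative single-pass structure).
-- Both A and B mutate `lines` in place (A by item assignment, B by lines[:] = out); the
-- equivalence proved here is about the return value.

-- shared translations of the Python subexpressions `line.rstrip() == "---"` and
-- `line.rstrip() + "\n" if line.endswith("\n") else line.rstrip()` (both sources contain them verbatim)
def pvFence (l : String) : Bool := PySem.Str.rstrip l == "---"

def pvStrip (line : String) : String :=
  if PySem.Str.endswith line "\n" then PySem.Str.rstrip line ++ "\n" else PySem.Str.rstrip line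

-- ===== PORT A =====
-- `_in_frontmatter`: rescans lines[0:idx] counting "---" fences (i < idx ≤ len(lines) always
-- holds at the call sites, so List.getD with a dummy default is exact for lines[i])
def pv_in_frontmatter (ls : List String) (idx : Nat) : Bool :=
  match ls with
  | [] => false
  | l0 :: _ =>
    if !(pvFence l0) then false
    else ((List.range idx).foldl (fun fc i => if pvFence (ls.getD i "") then fc + 1 else fc) 0) == 1

-- one iteration of A's `for i, line in enumerate(lines)` loop over the mutated-in-place list
def pvAStep (st : List String × Int) (i : Nat) : List String × Int :=
  if pv_in_frontmatter st.1 i then st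
  else
    let stripped := pvStrip (st.1.getD i "")
    if stripped != st.1.getD i "" then (st.1.set i stripped, st.2 + 1) else st

def fix_md009 (lines : List String) : List String × Int :=
  (List.range lines.length).foldl pvAStep (lines, 0)

-- ===== PORT B =====
-- `bool(lines) and lines[0].rstrip() == "---"`
def pvHasFm (lines : List String) : Bool :=
  match lines with
  | [] => false
  | l0 :: _ => pvFence l0

-- one iteration of B's single pass; state = (out reversed, count, fences seen so far)
def pvBStep (hasFm : Bool) (st : List String × Int × Nat) (line : String) : List String × Int × Nat :=
  let inFm := hasFm && st.2.2 == 1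
  let fences := if pvFence line then st.2.2 + 1 else st.2.2
  if inFm then (line :: st.1, st.2.1, fences)
  else
    let stripped := pvStrip line
    (stripped :: st.1, (if stripped != line then st.2.1 + 1 else st.2.1), fences)

def fix_md009_alt (lines : List String) : List String × Int :=
  let st := lines.foldl (pvBStep (pvHasFm lines)) ([], 0, 0)
  (st.1.reverse, st.2.1)

-- ===== PRECONDITION & SPEC =====
def Spec_fix_md009 (lines : List String) (out : List String × Int) : Prop := out = fix_md009_alt lines
instance (lines : List String) (out : List String × Int) : Decidable (Spec_fix_md009 lines out) := by unfold Spec_fix_md009; infer_instance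

-- ===== CLAIM (what is proved, stated in full; the proofs are below) =====
def Claim_equal_fix_md009 : Prop := ∀ (lines : List String), Dom_fix_md009 lines → Spec_fix_md009 lines (fix_md009 lines)

-- ===== LEMMAS AND PROOFS =====

theorem dw_idem {α} (p : α → Bool) (l : List α) :
    List.dropWhile p (List.dropWhile p l) = List.dropWhile p l := by
  rw [List.dropWhile_eq_self_iff]
  intro hl
  have h := List.head?_dropWhile_not p l
  rw [List.head?_eq_getElem?] at h
  simpa [List.getElem?_eq_getElem hl] using h

theorem chars_rstrip_rstrip (cs : List Char) :
    PySem.Chars.rstrip (PySem.Chars.rstrip cs) = PySem.Chars.rstrip cs := by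
  unfold PySem.Chars.rstrip
  simp [dw_idem]

theorem chars_rstrip_concat_nl (cs : List Char) :
    PySem.Chars.rstrip (PySem.Chars.rstrip cs ++ ['\n']) = PySem.Chars.rstrip cs := by
  unfold PySem.Chars.rstrip
  rw [List.reverse_append]
  simp only [List.reverse_reverse, List.reverse_cons, List.reverse_nil, List.nil_append,
    List.singleton_append]
  rw [List.dropWhile_cons_of_pos (by decide), dw_idem]

theorem rstrip_pvStrip (l : String) : PySem.Str.rstrip (pvStrip l) = PySem.Str.rstrip l := by
  unfold pvStrip
  split
  · show PySem.Str.rstrip (PySem.Str.rstrip l ++ "\n") = PySem.Str.rstrip l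
    unfold PySem.Str.rstrip
    simp only [String.toList_append, String.toList_ofList]
    have : ("\n" : String).toList = ['\n'] := by decide
    rw [this, chars_rstrip_concat_nl]
  · unfold PySem.Str.rstrip
    simp [chars_rstrip_rstrip]

theorem range_fence_count (ls : List String) (idx : Nat) (h : idx ≤ ls.length) :
    (List.range idx).foldl (fun fc i => if pvFence (ls.getD i "") then fc + 1 else fc) 0
      = (ls.take idx).countP pvFence := by
  induction idx with
  | zero => simp
  | succ n ih =>
    rw [List.range_succ, List.foldl_append, ih (by omega)]
    have hn : n < ls.length := by omega
    have ht : List.take (n + 1) ls = List.take n ls ++ [ls[n]] := by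
      rw [List.take_add_one]; simp [List.getElem?_eq_getElem hn]
    simp only [List.foldl_cons, List.foldl_nil, ht, List.countP_append, List.countP_singleton,
      List.getD, List.getElem?_eq_getElem hn, Option.getD_some]
    split <;> simp_all

def pvHeadFence (ls : List String) : Bool :=
  match ls with
  | [] => false
  | l0 :: _ => pvFence l0

theorem pvFence_pvStrip (l : String) : pvFence (pvStrip l) = pvFence l := by
  unfold pvFence; rw [rstrip_pvStrip]


theorem in_fm_eq (done rest : List String) (l : String) :
    pv_in_frontmatter (done ++ l :: rest) done.length
      = (pvHeadFence (done ++ l :: rest) && ((done.countP pvFence) == 1)) := by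
  have hlen : done.length ≤ (done ++ l :: rest).length := by simp
  have hcount := range_fence_count (done ++ l :: rest) done.length hlen
  rw [List.take_left] at hcount
  cases done with
  | nil =>
    simp only [List.nil_append, List.length_nil]
    simp only [pv_in_frontmatter, pvHeadFence]
    cases h : pvFence l <;> simp
  | cons d ds =>
    simp only [List.cons_append] at hcount ⊢
    simp only [pv_in_frontmatter, pvHeadFence]
    rw [show (List.range (d :: ds).length).foldl
          (fun fc i => if pvFence ((d :: (ds ++ l :: rest)).getD i "") then fc + 1 else fc) 0
        = List.countP pvFence (d :: ds) from hcount]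
    cases h : pvFence d <;> simp [h]theorem main_loop (hasFm : Bool) :
    ∀ (rest done : List String) (count : Int),
      hasFm = pvHeadFence (done ++ rest) →
      (List.range' done.length rest.length).foldl pvAStep (done ++ rest, count)
        = ((rest.foldl (pvBStep hasFm) (done.reverse, count, done.countP pvFence)).1.reverse,
           (rest.foldl (pvBStep hasFm) (done.reverse, count, done.countP pvFence)).2.1) := by
  intro rest
  induction rest with
  | nil => intro done count h; simp
  | cons l rest' ih =>
    intro done count h
    have hget : (done ++ l :: rest').getD done.length "" = l := by
      simp [List.getD]
    have hfm := in_fm_eq done rest' l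
    rw [← h] at hfm
    have hx : pvFence (if hasFm && (done.countP pvFence == 1) then l else pvStrip l) = pvFence l := by
      split
      · rfl
      · exact pvFence_pvStrip l
    have hstepA : pvAStep (done ++ l :: rest', count) done.length
        = (done ++ (if hasFm && (done.countP pvFence == 1) then l else pvStrip l) :: rest',
           if hasFm && (done.countP pvFence == 1) then count
           else if pvStrip l != l then count + 1 else count) := by
      unfold pvAStep
      simp only [hfm, hget]
      cases hc : hasFm && (done.countP pvFence == 1) with
      | true => simp
      | false =>
        cases hb : (pvStrip l != l) with
        | true =>
          have hset : (done ++ l :: rest').set done.length (pvStrip l) = done ++ pvStrip l :: rest' := by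
            rw [List.set_append]; simp
          simp [hset]
        | false =>
          have heq : pvStrip l = l := by simpa using hb
          simp [heq]
    have hstepB : pvBStep hasFm (done.reverse, count, done.countP pvFence) l
        = ((if hasFm && (done.countP pvFence == 1) then l else pvStrip l) :: done.reverse,
           (if hasFm && (done.countP pvFence == 1) then count
            else if pvStrip l != l then count + 1 else count),
           if pvFence l then done.countP pvFence + 1 else done.countP pvFence) := by
      unfold pvBStep
      cases hc : hasFm && (done.countP pvFence == 1) <;> simp
    have h' : hasFm = pvHeadFence ((done ++ [if hasFm && (done.countP pvFence == 1) then l else pvStrip l]) ++ rest') := by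
      rw [h]
      cases done with
      | nil =>
        simp [pvHeadFence]
        exact (pvFence_pvStrip l).symm
      | cons d ds => simp [pvHeadFence]
    have hcountP : (done ++ [if hasFm && (done.countP pvFence == 1) then l else pvStrip l]).countP pvFence
        = (if pvFence l then done.countP pvFence + 1 else done.countP pvFence) := by
      rw [List.countP_append, List.countP_singleton, hx]
      cases hfl : pvFence l <;> simp
    rw [List.length_cons, List.range'_succ, List.foldl_cons, List.foldl_cons, hstepA, hstepB]
    have := ih (done ++ [if hasFm && (done.countP pvFence == 1) then l else pvStrip l])
      (if hasFm && (done.countP pvFence == 1) then count else if pvStrip l != l then count + 1 else count) h'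
    rw [List.append_assoc, List.singleton_append, List.length_append, List.length_singleton] at this
    rw [this, List.reverse_append, List.reverse_singleton, List.singleton_append, hcountP]


-- ===== VERDICT (by name: the statement is the Claim_ definition above) =====
theorem fix_md009_spec : Claim_equal_fix_md009 := by
  intro lines _
  unfold Spec_fix_md009 fix_md009 fix_md009_alt
  have h := main_loop (pvHasFm lines) lines [] 0 (by cases lines <;> rfl)
  simp only [List.nil_append, List.length_nil, List.reverse_nil, List.countP_nil] at h
  rw [List.range_eq_range']
  exact h
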